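-- pv_equiv track=rewrite | github.com/camarcano/tbox | scouting_report.py | _total_bases_from_events
-- ===== SOURCE A (Python) =====
-- def _total_bases_from_events(events):
--     tb = 0
--     for ev in events:
--         if ev == 'single':
--             tb += 1
--         elif ev == 'double':
--             tb += 2
--         elif ev == 'triple':
--             tb += 3
--         elif ev == 'home_run':
--             tb += 4
--     return tb
-- ===== SOURCE B (Python) =====
-- def _total_bases_from_events(events):
--     return sum(bases * events.count(label)
--                for bases, label in enumerate(('single', 'double', 'triple', 'home_run'), start=1))
-- ===== Notes on version B (the rewrite author's own statement) =====
-- stated objective: idiomatic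
-- what changed: Instead of one pass with a branch-ladder accumulator over the events, B makes four staged counting passes (events.count per hit label) and sums the weighted counts in a generator over the (weight, label) table.
import Mathlib
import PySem

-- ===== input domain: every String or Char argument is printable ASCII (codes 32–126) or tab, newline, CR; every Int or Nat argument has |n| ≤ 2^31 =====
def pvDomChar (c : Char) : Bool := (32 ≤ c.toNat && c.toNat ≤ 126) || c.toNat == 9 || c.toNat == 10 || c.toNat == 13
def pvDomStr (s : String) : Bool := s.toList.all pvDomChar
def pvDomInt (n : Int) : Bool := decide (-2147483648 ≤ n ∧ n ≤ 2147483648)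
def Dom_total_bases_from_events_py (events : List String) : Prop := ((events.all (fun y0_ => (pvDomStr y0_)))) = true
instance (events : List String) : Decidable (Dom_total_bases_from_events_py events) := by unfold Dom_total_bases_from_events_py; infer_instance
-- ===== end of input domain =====

-- ===== PORT A =====
-- B replaces A's single-pass branch-ladder accumulator by four staged counting passes
-- (one events.count per hit label) combined as a weighted sum; same O(n), more idiomatic.
def total_bases_from_events_py (events : List String) : Int :=
  events.foldl (fun tb ev =>
    if ev = "single" then tb + 1
    else if ev = "double" then tb + 2
    else if ev = "triple" then tb + 3
    else if ev = "home_run" then tb + 4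
    else tb) 0

-- ===== PORT B =====
-- sum(bases * events.count(label) for bases, label in enumerate(('single','double','triple','home_run'), 1))
def total_bases_from_events_py_alt (events : List String) : Int :=
  (((PySem.List.enumerate [ "single", "double", "triple", "home_run" ] 1).map
      (fun p => p.1 * (PySem.List.count events p.2 : Int))).sum)

-- ===== PRECONDITION & SPEC =====
def Spec_total_bases_from_events_py (events : List String) (out : Int) : Prop := out = total_bases_from_events_py_alt events
instance (events : List String) (out : Int) : Decidable (Spec_total_bases_from_events_py events out) := by unfold Spec_total_bases_from_events_py; infer_instance

-- ===== CLAIM (what is proved, stated in full; the proofs are below) =====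
def Claim_equal_total_bases_from_events_py : Prop := ∀ (events : List String), Dom_total_bases_from_events_py events → Spec_total_bases_from_events_py events (total_bases_from_events_py events)

-- ===== LEMMAS AND PROOFS =====
theorem foldl_tb_eq (events : List String) : ∀ (tb : Int),
    events.foldl (fun tb ev =>
      if ev = "single" then tb + 1
      else if ev = "double" then tb + 2
      else if ev = "triple" then tb + 3
      else if ev = "home_run" then tb + 4
      else tb) tb
    = tb + (events.count "single" : Int) + 2 * (events.count "double" : Int)
        + 3 * (events.count "triple" : Int) + 4 * (events.count "home_run" : Int) := by
  induction events with
  | nil => intro tb; simp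
  | cons e es ih =>
    intro tb
    simp only [List.foldl_cons, ih, List.count_cons]
    by_cases h1 : e = "single" <;> by_cases h2 : e = "double" <;>
      by_cases h3 : e = "triple" <;> by_cases h4 : e = "home_run" <;>
      simp_all <;> ring

-- ===== VERDICT (by name: the statement is the Claim_ definition above) =====
theorem total_bases_from_events_py_spec : Claim_equal_total_bases_from_events_py := by
  intro events _
  show _ = _
  simp only [total_bases_from_events_py, total_bases_from_events_py_alt, foldl_tb_eq,
    PySem.List.count_eq, PySem.List.enumerate, List.map, List.sum_cons, List.sum_nil]
  ring
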